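-- pv_equiv track=rewrite | github.com/amundstorruste/advent_of_code | 08.12.2022/main.py | traverse_list_find_visibility
-- ===== SOURCE A (Python) =====
-- def traverse_list_find_visibility(list):
--     results = []
--     largest_value = -1
--     visibility = -1
--     previous_value = -1
--     for pos, value in enumerate(list):
--         if value > largest_value:
--             largest_value = value
--             visibility = pos
--         elif value <= previous_value:
--             visibility = 1
--         else:
--             visibility = 1
--             previous_values = list[:pos]
--             for prev_value in reversed(previous_values):
--                 if prev_value < value:
--                     visibility+=1
--                 else:
--                     break
--
--         results.append(visibility)
--         previous_value = value
--     return results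
-- ===== SOURCE B (Python) =====
-- def traverse_list_find_visibility(list):
--     results = []
--     stack = [(-1, -1)]  # (position, height); sentinel matches A's -1 baseline for the edge
--     for pos, value in enumerate(list):
--         while stack and stack[-1][1] < value:
--             stack.pop()
--         results.append(pos - stack[-1][0] if stack else pos)
--         stack.append((pos, value))
--     return results
-- ===== Notes on version B (the rewrite author's own statement) =====
-- stated objective: faster
-- what changed: Replaces A's per-element backward rescan of the whole prefix with a monotonic non-increasing stack giving the nearest previous >= element in O(1) amortized.
import Mathlib
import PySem

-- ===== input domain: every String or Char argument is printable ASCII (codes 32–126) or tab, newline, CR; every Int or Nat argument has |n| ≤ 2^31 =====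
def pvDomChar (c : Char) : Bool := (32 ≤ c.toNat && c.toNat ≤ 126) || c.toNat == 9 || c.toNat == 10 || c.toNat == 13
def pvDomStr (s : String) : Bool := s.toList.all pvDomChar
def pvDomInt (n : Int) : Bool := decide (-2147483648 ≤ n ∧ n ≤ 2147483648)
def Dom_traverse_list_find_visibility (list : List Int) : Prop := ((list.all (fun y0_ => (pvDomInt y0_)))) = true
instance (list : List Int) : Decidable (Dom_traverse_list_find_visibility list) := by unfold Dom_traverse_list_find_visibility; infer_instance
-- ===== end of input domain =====

-- B replaces A's O(n^2) backward rescan of the prefix at every position by a single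
-- monotonic (non-increasing) stack of (position, height) pairs: the nearest previous
-- element >= the current one is found in O(1) amortized; return values are identical.

-- ===== PORT A =====
-- inner `for prev_value in reversed(previous_values): ...` loop of A
def pyAInner (prevs : List Int) (value : Int) (vis : Int) : Int :=
  match prevs with
  | [] => vis
  | p :: rest => if p < value then pyAInner rest value (vis + 1) else vis

-- main `for pos, value in enumerate(list)` loop of A; state = (results, largest_value, previous_value),
-- pos carried as the running index
def pyAGo (full : List Int) (pos : Nat) (rest : List Int)
    (results : List Int) (largest prev : Int) : List Int :=
  match rest with
  | [] => results
  | value :: t =>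
      let vis : Int :=
        if value > largest then (pos : Int)
        else if value ≤ prev then 1
        else pyAInner ((full.take pos).reverse) value 1   -- reversed(list[:pos]), pos ≥ 0
      let largest' := if value > largest then value else largest
      pyAGo full (pos + 1) t (results ++ [vis]) largest' value

def traverse_list_find_visibility (list : List Int) : List Int :=
  pyAGo list 0 list [] (-1) (-1)

-- ===== PORT B =====
-- `while stack and stack[-1][1] < value: stack.pop()`; stack head = Python's stack[-1]
def pyPop (stack : List (Int × Int)) (value : Int) : List (Int × Int) :=
  match stack with
  | [] => []
  | (j, h) :: rest => if h < value then pyPop rest value else (j, h) :: rest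

-- `for pos, value in enumerate(list)` loop of B; state = (results, stack)
def pyBGo (pos : Nat) (rest : List Int) (results : List Int)
    (stack : List (Int × Int)) : List Int :=
  match rest with
  | [] => results
  | value :: t =>
      let s := pyPop stack value
      let r : Int :=
        match s with
        | [] => (pos : Int)
        | (j, _) :: _ => (pos : Int) - j
      pyBGo (pos + 1) t (results ++ [r]) ((pos, value) :: s)

def traverse_list_find_visibility_alt (list : List Int) : List Int :=
  pyBGo 0 list [] [(-1, -1)]

-- ===== PRECONDITION & SPEC =====
def Spec_traverse_list_find_visibility (list : List Int) (out : List Int) : Prop := out = traverse_list_find_visibility_alt list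
instance (list : List Int) (out : List Int) : Decidable (Spec_traverse_list_find_visibility list out) := by unfold Spec_traverse_list_find_visibility; infer_instance

-- ===== CLAIM (what is proved, stated in full; the proofs are below) =====
def Claim_equal_traverse_list_find_visibility : Prop := ∀ (list : List Int), Dom_traverse_list_find_visibility list → Spec_traverse_list_find_visibility list (traverse_list_find_visibility list)

-- ===== LEMMAS AND PROOFS =====

-- reference value: A's and B's common visibility of `v` behind the reversed prefix `rev`
def refVis (rev : List Int) (v : Int) : Int :=
  match rev with
  | [] => if v > -1 then 0 else 1
  | h :: t => if h < v then 1 + refVis t v else 1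

-- reference result list
def refGo (pre rest : List Int) : List Int :=
  match rest with
  | [] => []
  | v :: t => refVis pre.reverse v :: refGo (pre ++ [v]) t

theorem pyAInner_succ (l : List Int) (v c : Int) :
    pyAInner l v (c + 1) = pyAInner l v c + 1 := by
  induction l generalizing c with
  | nil => rfl
  | cons h t ih =>
      simp only [pyAInner]
      split_ifs with hc
      · exact ih (c + 1)
      · rfl

theorem refVis_all_lt (rev : List Int) (v : Int) (h : ∀ y ∈ rev, y < v) :
    refVis rev v = (rev.length : Int) + (if v > -1 then 0 else 1) := by
  induction rev with
  | nil => simp [refVis]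
  | cons a t ih =>
      have ha : a < v := h a (by simp)
      have ht : ∀ y ∈ t, y < v := fun y hy => h y (by simp [hy])
      simp only [refVis, if_pos ha, ih ht, List.length_cons]
      push_cast; ring

theorem pyAInner_eq_refVis (rev : List Int) (v : Int)
    (h : (∃ y ∈ rev, v ≤ y) ∨ v ≤ -1) :
    pyAInner rev v 1 = refVis rev v := by
  induction rev with
  | nil =>
      rcases h with ⟨y, hy, _⟩ | h
      · simp at hy
      · simp only [pyAInner, refVis]
        rw [if_neg (by omega)]
  | cons a t ih =>
      simp only [pyAInner, refVis]
      split_ifs with hc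
      · have h' : (∃ y ∈ t, v ≤ y) ∨ v ≤ -1 := by
          rcases h with ⟨y, hy, hvy⟩ | h
          · rcases List.mem_cons.mp hy with rfl | hy
            · omega
            · exact Or.inl ⟨y, hy, hvy⟩
          · exact Or.inr h
        rw [pyAInner_succ t v 1, ih h']
        ring
      · rfl

-- stack invariant for B (named StackInv; `Inv` clashes with Mathlib)
def StackInv (pre : List Int) (S : List (Int × Int)) : Prop :=
  ∀ v : Int,
    (pyPop S v = [] → v > -1 ∧ ∀ y ∈ pre, y < v) ∧
    (∀ j h rest, pyPop S v = (j, h) :: rest → refVis pre.reverse v = (pre.length : Int) - j)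

theorem pyPop_pyPop (S : List (Int × Int)) (x v : Int) (hx : x < v) :
    pyPop (pyPop S x) v = pyPop S v := by
  induction S with
  | nil => rfl
  | cons p t ih =>
      obtain ⟨j, h⟩ := p
      by_cases hc : h < x
      · have hv : h < v := hc.trans hx
        rw [show pyPop ((j, h) :: t) x = pyPop t x from by simp [pyPop, hc]]
        rw [ih]
        rw [show pyPop ((j, h) :: t) v = pyPop t v from by simp [pyPop, hv]]
      · rw [show pyPop ((j, h) :: t) x = (j, h) :: t from by simp [pyPop, hc]]

theorem stackInv_init : StackInv [] [(-1, -1)] := by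
  intro v
  by_cases hc : (-1 : Int) < v
  · constructor
    · intro _; exact ⟨hc, by simp⟩
    · intro j h rest hp
      simp [pyPop, hc] at hp
  · constructor
    · intro hp; simp [pyPop, hc] at hp
    · intro j h rest hp
      simp [pyPop, hc] at hp
      obtain ⟨⟨hj, _⟩, _⟩ := hp
      simp only [List.reverse_nil, refVis, List.length_nil]
      rw [if_neg (by omega)]
      omega

theorem stackInv_step (pre : List Int) (S : List (Int × Int)) (x : Int)
    (hI : StackInv pre S) :
    StackInv (pre ++ [x]) (((pre.length : Int), x) :: pyPop S x) := by
  intro v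
  by_cases hxv : x < v
  · have hpop : pyPop (((pre.length : Int), x) :: pyPop S x) v = pyPop S v := by
      rw [show pyPop (((pre.length : Int), x) :: pyPop S x) v = pyPop (pyPop S x) v from by
        simp [pyPop, hxv]]
      exact pyPop_pyPop S x v hxv
    constructor
    · intro hp
      rw [hpop] at hp
      obtain ⟨hv, hall⟩ := (hI v).1 hp
      refine ⟨hv, ?_⟩
      intro y hy
      rcases List.mem_append.mp hy with hy | hy
      · exact hall y hy
      · simp at hy; omega
    · intro j h rest hp
      rw [hpop] at hp
      have hx' : refVis (pre ++ [x]).reverse v = 1 + refVis pre.reverse v := by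
        simp [refVis, if_pos hxv]
      have hmain := (hI v).2 j h rest hp
      rw [hx', hmain]
      simp only [List.length_append, List.length_cons, List.length_nil]
      push_cast; ring
  · have hpop : pyPop (((pre.length : Int), x) :: pyPop S x) v
        = ((pre.length : Int), x) :: pyPop S x := by
      simp [pyPop, hxv]
    constructor
    · intro hp; rw [hpop] at hp; cases hp
    · intro j h rest hp
      rw [hpop] at hp
      simp only [List.cons.injEq, Prod.mk.injEq] at hp
      obtain ⟨⟨hj, _⟩, _⟩ := hp
      subst hj
      have : refVis (pre ++ [x]).reverse v = 1 := by
        simp [refVis, hxv]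
      rw [this]
      simp only [List.length_append, List.length_cons, List.length_nil]
      push_cast; ring

-- largest_value after prefix `pre`, exactly as A updates it
def lmax (pre : List Int) : Int := pre.foldl (fun a b => if b > a then b else a) (-1)

theorem foldl_max_le (l : List Int) (init y : Int) (h : y ≤ init) :
    y ≤ l.foldl (fun a b => if b > a then b else a) init := by
  induction l generalizing init with
  | nil => simpa using h
  | cons a t ih =>
      simp only [List.foldl_cons]
      apply ih
      split_ifs with hb <;> omega

theorem foldl_max_mem (l : List Int) (init : Int) :
    ∀ y ∈ l, y ≤ l.foldl (fun a b => if b > a then b else a) init := by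
  induction l generalizing init with
  | nil => simp
  | cons a t ih =>
      intro y hy
      rcases List.mem_cons.mp hy with rfl | hy
      · simp only [List.foldl_cons]
        apply foldl_max_le
        split_ifs with hb <;> omega
      · simpa using ih (if a > init then a else init) y hy

-- A's running maximum is -1 or an element of the prefix
theorem lmax_eq_or_mem (pre : List Int) : lmax pre = -1 ∨ lmax pre ∈ pre := by
  unfold lmax
  induction pre using List.reverseRecOn with
  | nil => left; rfl
  | append_singleton l a ihl =>
      rw [List.foldl_append]
      simp only [List.foldl_cons, List.foldl_nil]
      rcases ihl with h | h
      · rw [h]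
        split_ifs
        · right; simp
        · left; rfl
      · split_ifs
        · right; simp
        · right; simp [h]

-- getLast? is the head of the reverse
theorem getLast?_eq_head?_rev (l : List Int) : l.getLast? = l.reverse.head? := by
  cases h : l.reverse with
  | nil => simp [List.reverse_eq_nil_iff.mp h]
  | cons a t =>
      have : l = (a :: t).reverse := by rw [← h]; simp
      subst this
      simp

-- A's main loop computes the reference list
theorem pyAGo_ref (rest : List Int) :
    ∀ pre results,
      pyAGo (pre ++ rest) pre.length rest results (lmax pre)
        ((pre.getLast?).getD (-1)) = results ++ refGo pre rest := by
  induction rest with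
  | nil => intro pre results; simp [pyAGo, refGo]
  | cons v t ih =>
      intro pre results
      simp only [pyAGo, refGo]
      have htake : (pre ++ v :: t).take pre.length = pre := by simp
      have hinit : (-1 : Int) ≤ lmax pre := foldl_max_le pre (-1) (-1) le_rfl
      have hvis :
          (if v > lmax pre then ((pre.length : Nat) : Int)
           else if v ≤ (pre.getLast?).getD (-1) then 1
           else pyAInner ((pre ++ v :: t).take pre.length).reverse v 1)
          = refVis pre.reverse v := by
        rw [htake]
        split_ifs with h1 h2
        · -- new running maximum: all of pre < v and v > -1
          have hall : ∀ y ∈ pre.reverse, y < v := by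
            intro y hy
            have := foldl_max_mem pre (-1) y (List.mem_reverse.mp hy)
            unfold lmax at h1
            omega
          rw [refVis_all_lt pre.reverse v hall]
          rw [if_pos (by omega)]
          simp
        · -- blocked by the immediately preceding value (or empty prefix with v ≤ -1)
          rw [getLast?_eq_head?_rev] at h2
          cases hrev : pre.reverse with
          | nil =>
              rw [hrev] at h2
              simp only [List.head?_nil, Option.getD_none] at h2
              simp only [refVis]
              rw [if_neg (by omega)]
          | cons p tl =>
              rw [hrev] at h2
              simp only [List.head?_cons, Option.getD_some] at h2
              simp only [refVis]
              rw [if_neg (by omega)]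
        · -- backward scan over the reversed prefix
          have hker : (∃ y ∈ pre.reverse, v ≤ y) ∨ v ≤ -1 := by
            rcases lmax_eq_or_mem pre with h | h
            · right; omega
            · left; exact ⟨lmax pre, List.mem_reverse.mpr h, by omega⟩
          exact pyAInner_eq_refVis pre.reverse v hker
      rw [hvis]
      have hlmax : (if v > lmax pre then v else lmax pre) = lmax (pre ++ [v]) := by
        simp [lmax, List.foldl_append]
      have h2 := ih (pre ++ [v]) (results ++ [refVis pre.reverse v])
      simp only [List.append_assoc, List.singleton_append, List.length_append,
        List.length_cons, List.length_nil, List.getLast?_concat, Option.getD_some,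
        Nat.zero_add] at h2
      rw [hlmax]
      rw [h2]

-- B's main loop computes the reference list
theorem pyBGo_ref (rest : List Int) :
    ∀ pre results S, StackInv pre S →
      pyBGo pre.length rest results S = results ++ refGo pre rest := by
  induction rest with
  | nil => intro pre results S _; simp [pyBGo, refGo]
  | cons v t ih =>
      intro pre results S hI
      simp only [pyBGo, refGo]
      have hr :
          (match pyPop S v with
           | [] => ((pre.length : Nat) : Int)
           | (j, _) :: _ => ((pre.length : Nat) : Int) - j)
          = refVis pre.reverse v := by
        cases hpop : pyPop S v with
        | nil =>
            obtain ⟨hv1, hall⟩ := (hI v).1 hpop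
            rw [refVis_all_lt pre.reverse v (by
              intro y hy; exact hall y (List.mem_reverse.mp hy))]
            rw [if_pos hv1]
            simp
        | cons p rest' =>
            obtain ⟨j, h⟩ := p
            rw [(hI v).2 j h rest' hpop]
      rw [hr]
      have hI' : StackInv (pre ++ [v]) (((pre.length : Int), v) :: pyPop S v) :=
        stackInv_step pre S v hI
      have h2 := ih (pre ++ [v]) (results ++ [refVis pre.reverse v]) _ hI'
      simp only [List.length_append, List.length_cons, List.length_nil,
        Nat.zero_add] at h2
      rw [h2]
      simp

-- ===== VERDICT (by name: the statement is the Claim_ definition above) =====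
theorem traverse_list_find_visibility_spec : Claim_equal_traverse_list_find_visibility := by
  intro list _
  unfold Spec_traverse_list_find_visibility
  unfold traverse_list_find_visibility traverse_list_find_visibility_alt
  have hA := pyAGo_ref list [] []
  have hB := pyBGo_ref list [] [] [(-1, -1)] stackInv_init
  simp only [List.nil_append, List.length_nil, List.getLast?_nil, Option.getD_none] at hA hB
  rw [show lmax [] = -1 from rfl] at hA
  rw [hA, hB]
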